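-- pv_equiv track=rewrite | github.com/kana215/Jira-tasker-FULL | app.py | model_pick
-- ===== SOURCE A (Python) =====
-- from typing import Any, Dict, List, Optional, Tuple
--
-- def model_pick(models:List[str], prefer:str)->str:
--     if prefer and prefer in models: return prefer
--     if prefer:
--         low=prefer.lower()
--         for m in models:
--             if m.lower()==low: return m
--     ranked=[]
--     for m in models:
--         ml=m.lower();score=0
--         if "instruct" in ml or "chat" in ml: score+=3
--         if "llama" in ml: score+=2
--         if "scout" in ml: score+=1
--         if "fp8" in ml: score+=1
--         ranked.append((score,m))
--     ranked.sort(key=lambda x:(-x[0],x[1]))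
--     return ranked[0][1] if ranked else ""
-- ===== SOURCE B (Python) =====
-- def model_pick(models, prefer):
--     if prefer and prefer in models: return prefer
--     if prefer:
--         low = prefer.lower()
--         for m in models:
--             if m.lower() == low: return m
--     if not models:
--         return ""
--     def score(m):
--         ml = m.lower()
--         return ((3 if ("instruct" in ml or "chat" in ml) else 0)
--                 + (2 if "llama" in ml else 0)
--                 + (1 if "scout" in ml else 0)
--                 + (1 if "fp8" in ml else 0))
--     return min(models, key=lambda m: (-score(m), m))
-- ===== Notes on version B (the rewrite author's own statement) =====
-- stated objective: simpler
-- what changed: Replaces building a (score, name) list and sorting it with a single linear min-selection keyed by (-score, name), guarding the empty list explicitly.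
import Mathlib
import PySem

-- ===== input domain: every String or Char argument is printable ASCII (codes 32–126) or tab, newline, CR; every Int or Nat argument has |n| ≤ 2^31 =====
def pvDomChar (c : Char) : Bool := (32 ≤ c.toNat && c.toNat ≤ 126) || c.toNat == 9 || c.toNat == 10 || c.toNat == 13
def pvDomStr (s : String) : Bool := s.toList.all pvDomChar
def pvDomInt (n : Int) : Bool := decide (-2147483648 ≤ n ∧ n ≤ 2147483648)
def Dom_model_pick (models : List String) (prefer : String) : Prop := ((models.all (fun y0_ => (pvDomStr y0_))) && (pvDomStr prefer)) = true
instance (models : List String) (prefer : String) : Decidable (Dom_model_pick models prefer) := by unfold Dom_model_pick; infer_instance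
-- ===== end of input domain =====

-- B replaces A's build-ranked-list-then-sort phase by a single linear min-selection
-- keyed by (-score, name); simpler, same results.

-- shared scoring helper: the score both Pythons compute for a model name
def pvScore (m : String) : Int :=
  let ml := PySem.Str.lower m
  (if PySem.Str.isIn "instruct" ml || PySem.Str.isIn "chat" ml then 3 else 0)
  + (if PySem.Str.isIn "llama" ml then 2 else 0)
  + (if PySem.Str.isIn "scout" ml then 1 else 0)
  + (if PySem.Str.isIn "fp8" ml then 1 else 0)

-- ===== PORT A =====
def model_pick (models : List String) (prefer : String) : String :=
  if prefer ≠ "" ∧ prefer ∈ models then prefer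
  else
    match (if prefer ≠ "" then
             models.find? (fun m => PySem.Str.lower m == PySem.Str.lower prefer)
           else none) with
    | some m => m
    | none =>
      -- ranked = [(score, m) for m in models]; ranked.sort(key=lambda x: (-x[0], x[1]))
      match PySem.List.sorted2
              (models.foldl (fun acc m => acc ++ [(pvScore m, m)]) ([] : List (Int × String)))
              (fun x => -x.1) (fun x => x.2) false with
      | (_, m) :: _ => m
      | [] => ""

-- ===== PORT B =====
def model_pick_alt (models : List String) (prefer : String) : String :=
  if prefer ≠ "" ∧ prefer ∈ models then prefer
  else
    match (if prefer ≠ "" then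
             models.find? (fun m => PySem.Str.lower m == PySem.Str.lower prefer)
           else none) with
    | some m => m
    | none =>
      -- min(models, key=lambda m: (-score(m), m)) with an explicit empty guard
      match models with
      | [] => ""
      | m0 :: rest =>
        rest.foldl (fun best m =>
          if pvScore best < pvScore m ∨ (pvScore m = pvScore best ∧ m < best) then m
          else best) m0

-- ===== PRECONDITION & SPEC =====
def Spec_model_pick (models : List String) (prefer : String) (out : String) : Prop := out = model_pick_alt models prefer
instance (models : List String) (prefer : String) (out : String) : Decidable (Spec_model_pick models prefer out) := by unfold Spec_model_pick; infer_instance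

-- ===== CLAIM (what is proved, stated in full; the proofs are below) =====
def Claim_equal_model_pick : Prop := ∀ (models : List String) (prefer : String), Dom_model_pick models prefer → Spec_model_pick models prefer (model_pick models prefer)

-- ===== LEMMAS AND PROOFS =====

-- the lexicographic key min(..) minimises
def pvKey (m : String) : Lex (Int × String) := toLex (-(pvScore m), m)

-- the ranked-building foldl is a map
theorem pv_ranked_eq (models : List String) (acc : List (Int × String)) :
    models.foldl (fun acc m => acc ++ [(pvScore m, m)]) acc
      = acc ++ models.map (fun m => (pvScore m, m)) := by
  induction models generalizing acc with
  | nil => simp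
  | cons m rest ih => simp [List.foldl_cons, ih]

-- sorted2 with keys (-x.1, x.2) is sorted with the lexicographic key
theorem pv_sorted2_eq (xs : List (Int × String)) :
    PySem.List.sorted2 xs (fun x => -x.1) (fun x => x.2) false
      = PySem.List.sorted xs (fun x => toLex (-x.1, x.2)) false := by
  show List.foldl (fun acc x => PySem.List.insertBy
      (fun a b : Int × String =>
        decide ((-a.1 : Int) < -b.1) || (!decide ((-b.1 : Int) < -a.1) && decide (a.2 < b.2)))
      x acc) [] xs
    = List.foldl (fun acc x => PySem.List.insertBy
      (fun a b : Int × String =>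
        decide ((toLex (-a.1, a.2) : Lex (Int × String)) < toLex (-b.1, b.2)))
      x acc) [] xs
  have hbe : (fun a b : Int × String =>
        decide ((-a.1 : Int) < -b.1) || (!decide ((-b.1 : Int) < -a.1) && decide (a.2 < b.2)))
      = fun a b : Int × String =>
        decide ((toLex (-a.1, a.2) : Lex (Int × String)) < toLex (-b.1, b.2)) := by
    funext a b
    have hlhs : (decide ((-a.1 : Int) < -b.1) || (!decide ((-b.1 : Int) < -a.1) && decide (a.2 < b.2)))
        = decide ((-a.1 : Int) < -b.1 ∨ (¬ ((-b.1 : Int) < -a.1) ∧ a.2 < b.2)) := by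
      by_cases h1 : (-a.1 : Int) < -b.1 <;> by_cases h2 : (-b.1 : Int) < -a.1 <;>
        by_cases h3 : a.2 < b.2 <;> simp [h1, h2, h3]
    rw [hlhs, decide_eq_decide, Prod.Lex.toLex_lt_toLex]
    constructor
    · rintro (h | ⟨h, h3⟩)
      · exact Or.inl h
      · rcases lt_or_eq_of_le (not_lt.mp h) with h' | h'
        · exact Or.inl h'
        · exact Or.inr ⟨h', h3⟩
    · rintro (h | ⟨h, h3⟩)
      · exact Or.inl h
      · exact Or.inr ⟨by omega, h3⟩
  rw [hbe]

-- B's fold returns an element of the list that minimises pvKey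
theorem pv_fold_min (rest : List String) (m0 : String) :
    (rest.foldl (fun best m =>
        if pvScore best < pvScore m ∨ (pvScore m = pvScore best ∧ m < best) then m
        else best) m0) ∈ m0 :: rest ∧
    ∀ m ∈ m0 :: rest,
      pvKey (rest.foldl (fun best m =>
        if pvScore best < pvScore m ∨ (pvScore m = pvScore best ∧ m < best) then m
        else best) m0) ≤ pvKey m := by
  induction rest generalizing m0 with
  | nil =>
    refine ⟨List.mem_singleton.mpr rfl, ?_⟩
    intro m hm; rw [List.mem_singleton] at hm; subst hm; exact le_refl _
  | cons m1 rest ih =>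
    have hcond : (pvScore m0 < pvScore m1 ∨ (pvScore m1 = pvScore m0 ∧ m1 < m0))
        ↔ pvKey m1 < pvKey m0 := by
      unfold pvKey
      rw [Prod.Lex.toLex_lt_toLex]
      constructor
      · rintro (h | ⟨h, h'⟩)
        · left; omega
        · right; exact ⟨by omega, h'⟩
      · rintro (h | ⟨h, h'⟩)
        · left; omega
        · right; exact ⟨by omega, h'⟩
    simp only [List.foldl_cons]
    by_cases h : pvScore m0 < pvScore m1 ∨ (pvScore m1 = pvScore m0 ∧ m1 < m0)
    · rw [if_pos h]
      obtain ⟨hmem, hmin⟩ := ih m1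
      refine ⟨List.mem_cons_of_mem m0 hmem, ?_⟩
      · intro m hm
        simp only [List.mem_cons] at hm
        rcases hm with rfl | h'
        · exact le_trans (hmin m1 (by simp)) (le_of_lt (hcond.mp h))
        · exact hmin m (List.mem_cons.mpr h')
    · rw [if_neg h]
      obtain ⟨hmem, hmin⟩ := ih m0
      refine ⟨?_, ?_⟩
      · rcases List.mem_cons.mp hmem with h' | h'
        · exact List.mem_cons.mpr (Or.inl h')
        · exact List.mem_cons.mpr (Or.inr (List.mem_cons.mpr (Or.inr h')))
      · intro m hm
        simp only [List.mem_cons] at hm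
        rcases hm with rfl | rfl | h'
        · exact hmin m (by simp)
        · exact le_trans (hmin m0 (by simp)) (not_lt.mp fun hk => h (hcond.mpr hk))
        · exact hmin m (by simp [h'])

-- core: head of the sorted ranked list = B's linear selection
theorem pv_core (models : List String) :
    (match PySem.List.sorted2
        (models.foldl (fun acc m => acc ++ [(pvScore m, m)]) ([] : List (Int × String)))
        (fun x => -x.1) (fun x => x.2) false with
     | (_, m) :: _ => m
     | [] => "")
    = (match models with
       | [] => ""
       | m0 :: rest =>
         rest.foldl (fun best m =>
           if pvScore best < pvScore m ∨ (pvScore m = pvScore best ∧ m < best) then m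
           else best) m0) := by
  match models with
  | [] => rfl
  | m0 :: rest =>
    rw [pv_ranked_eq, pv_sorted2_eq, List.nil_append]
    set ranked := ((m0 :: rest).map (fun m => (pvScore m, m))) with hranked
    have hne : ranked ≠ [] := by simp [hranked]
    have hsne : PySem.List.sorted ranked (fun x => toLex (-x.1, x.2)) false ≠ [] := by
      intro h; exact hne ((PySem.List.sorted_eq_nil_iff _ _ _).mp h)
    obtain ⟨p, t, hpt⟩ :
        ∃ p t, PySem.List.sorted ranked (fun x => toLex (-x.1, x.2)) false = p :: t := by
      cases h : PySem.List.sorted ranked (fun x => toLex (-x.1, x.2)) false with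
      | nil => exact absurd h hsne
      | cons p t => exact ⟨p, t, rfl⟩
    have hple : ∀ y ∈ ranked, toLex (-p.1, p.2) ≤ toLex (-y.1, y.2) :=
      PySem.List.key_head_sorted_le ranked (fun x => toLex (-x.1, x.2)) hpt
    have hpmem : p ∈ ranked := by
      have := (PySem.List.mem_sorted ranked (fun x => toLex (-x.1, x.2)) false p).mp
        (hpt ▸ List.mem_cons_self)
      exact this
    obtain ⟨x, hx, hpx⟩ : ∃ x ∈ m0 :: rest, (pvScore x, x) = p := List.mem_map.mp hpmem
    obtain ⟨hbmem, hbmin⟩ := pv_fold_min rest m0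
    set b := rest.foldl (fun best m =>
        if pvScore best < pvScore m ∨ (pvScore m = pvScore best ∧ m < best) then m
        else best) m0 with hb
    have h1 : pvKey b ≤ pvKey x := hbmin x hx
    have h2 : pvKey x ≤ pvKey b := by
      have : (pvScore b, b) ∈ ranked := List.mem_map.mpr ⟨b, hbmem, rfl⟩
      have := hple _ this
      simpa [pvKey, ← hpx] using this
    have hkeq : pvKey x = pvKey b := le_antisymm h2 h1
    have hxb : x = b := by
      have := congrArg (fun k => (ofLex k).2) hkeq
      simpa [pvKey] using this
    obtain ⟨p1, p2⟩ := p
    rw [hpt]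
    show p2 = b
    have hx2 : x = p2 := congrArg Prod.snd hpx
    rw [← hx2]
    exact hxb

-- ===== VERDICT (by name: the statement is the Claim_ definition above) =====
theorem model_pick_spec : Claim_equal_model_pick := by
  intro models prefer _
  unfold Spec_model_pick model_pick model_pick_alt
  by_cases h : prefer ≠ "" ∧ prefer ∈ models
  · simp [h]
  · rw [if_neg h, if_neg h]
    cases hf : (if prefer ≠ "" then
        models.find? (fun m => PySem.Str.lower m == PySem.Str.lower prefer)
      else none) with
    | some m => rfl
    | none => exact pv_core models
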